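-- pv_equiv track=rewrite | github.com/openstack-infra/yaml2ical | yaml2ical/index.py | batch_meetings
-- ===== SOURCE A (Python) =====
-- def batch_meetings(meetings, batch_size):
--     """Batches the meetings to be consumed by the jinja2 'batch' filter.
--
--     This will pivot the meeting list into a virtual number of columns.  This
--     can be used in a jinja template like:
--
--     {% for column in batch_meetings(meetings, 4)|batch(4) %}
--
--     So the list:
--     [A, B, C, D, E, F , G, H, I]
--
--     Is returned as:
--     [A, D, F, H,   B, E, G, I,   C]]
--
--     Or another way of looking at it is:
--     [A, D, F, H,
--      B, E, G, I,
--      C]]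
--
--     And displays as:
--     A D F H
--     B E G I
--     C
--
--     Rather than:
--     A B C D
--     E F G H
--     I
--
--     :param meetings: An iterable
--     :param batch_size: Number of columns to split up the output into
--     :returns: A list that has 'pivoted' the meetings input
--
--     """
--     if batch_size <= 0:
--         return meetings
--     col_length = (len(meetings) // batch_size) + 1
--     new_meetings = [None] * len(meetings)
--     src = 0
--
--     for row in range(batch_size):
--         for col in range(col_length):
--             dest = col * batch_size + row
--             if dest >= len(meetings):
--                 break
--             new_meetings[dest] = meetings[src]
--             src += 1
--
--     # Sanity check
--     if all(meetings):
--         assert all(new_meetings), "Empty item found in: {}".format(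
--             new_meetings)
--     return new_meetings
-- ===== SOURCE B (Python) =====
-- def batch_meetings(meetings, batch_size):
--     """Pivot 'meetings' into batch_size columns (column-major order).
--
--     Closed-form permutation: output position i holds meetings[src(i)], where
--     column r = i % batch_size starts at offset r*q + min(r, rem) (the first
--     rem columns get one extra element) and i // batch_size indexes into it.
--     """
--     if batch_size <= 0:
--         return meetings
--     n = len(meetings)
--     q = n // batch_size
--     rem = n % batch_size
--     return [meetings[(i % batch_size) * q + min(i % batch_size, rem) + i // batch_size]
--             for i in range(n)]
-- ===== Notes on version B (the rewrite author's own statement) =====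
-- stated objective: simpler
-- what changed: Replaces the double loop that scatters elements into a preallocated None-list with a single comprehension using the closed-form inverse permutation (column r = i % batch_size starts at offset r*q + min(r, rem)), so no mutable buffer, no break, and no sanity assert are needed.
import Mathlib
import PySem

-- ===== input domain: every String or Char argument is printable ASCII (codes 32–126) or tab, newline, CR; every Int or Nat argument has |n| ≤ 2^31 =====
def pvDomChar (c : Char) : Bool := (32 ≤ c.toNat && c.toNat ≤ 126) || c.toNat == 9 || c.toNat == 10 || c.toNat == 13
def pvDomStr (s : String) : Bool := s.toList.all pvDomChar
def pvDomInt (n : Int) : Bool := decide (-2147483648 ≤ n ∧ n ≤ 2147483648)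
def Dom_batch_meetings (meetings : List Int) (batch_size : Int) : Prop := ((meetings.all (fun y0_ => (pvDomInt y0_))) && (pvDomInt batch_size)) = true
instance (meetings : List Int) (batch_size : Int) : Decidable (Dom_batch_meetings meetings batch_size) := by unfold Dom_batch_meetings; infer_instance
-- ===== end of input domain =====

-- B replaces A's scatter double loop (preallocated None-buffer, break, assert) by a single
-- comprehension using the closed-form source index of each output slot (objective: simpler).
-- Equal return values are proved; on batch_size <= 0 both return the argument itself.

-- ===== PORT A =====
-- inner `for col in range(col_length)` loop with its `break`; state = (new_meetings, src)
def pvInnerA (meet : List Int) (bs row : Int) :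
    List Int → List (Option Int) × Int → List (Option Int) × Int
  | [], st => st
  | col :: rest, (new, src) =>
      let dest := col * bs + row
      if dest ≥ (meet.length : Int) then (new, src)   -- break
      else pvInnerA meet bs row rest
        (new.set dest.toNat (PySem.List.pyGet? meet src), src + 1)

def batch_meetings (meetings : List Int) (batch_size : Int) : List Int :=
  if batch_size ≤ 0 then meetings
  else
    let col_length : Int := PySem.Int.floordiv (meetings.length : Int) batch_size + 1
    let res := (PySem.List.pyRange 0 batch_size 1).foldl
      (fun st row => pvInnerA meetings batch_size row (PySem.List.pyRange 0 col_length 1) st)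
      (List.replicate meetings.length (none : Option Int), (0 : Int))
    -- the sanity `assert` cannot fire (every slot of new_meetings gets written, as the
    -- equivalence proof below shows); it does not change the returned value
    res.1.map (fun o => o.getD 0)

-- ===== PORT B =====
def batch_meetings_alt (meetings : List Int) (batch_size : Int) : List Int :=
  if batch_size ≤ 0 then meetings
  else
    let n : Int := meetings.length
    let q := PySem.Int.floordiv n batch_size
    let rem := PySem.Int.mod n batch_size
    (PySem.List.pyRange 0 n 1).map (fun i =>
      (PySem.List.pyGet? meetings
        (PySem.Int.mod i batch_size * q + min (PySem.Int.mod i batch_size) rem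
          + PySem.Int.floordiv i batch_size)).getD 0)

-- ===== PRECONDITION & SPEC =====
def Spec_batch_meetings (meetings : List Int) (batch_size : Int) (out : List Int) : Prop := out = batch_meetings_alt meetings batch_size
instance (meetings : List Int) (batch_size : Int) (out : List Int) : Decidable (Spec_batch_meetings meetings batch_size out) := by unfold Spec_batch_meetings; infer_instance

-- ===== CLAIM (what is proved, stated in full; the proofs are below) =====
def Claim_equal_batch_meetings : Prop := ∀ (meetings : List Int) (batch_size : Int), Dom_batch_meetings meetings batch_size → Spec_batch_meetings meetings batch_size (batch_meetings meetings batch_size)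

-- ===== LEMMAS AND PROOFS =====

-- number of elements of column r; start offset of column r; source index of output slot d
def pvSz (q rem r : Nat) : Nat := q + (if r < rem then 1 else 0)
def pvOff (q rem r : Nat) : Nat := r * q + min r rem
def pvPerm (bn q rem d : Nat) : Nat := pvOff q rem (d % bn) + d / bn

-- slot c*bn + r is inside the list iff c is below the size of column r
lemma pv_char (bn q rem : Nat) (hrem : rem < bn) (r c : Nat) (hr : r < bn) :
    c * bn + r < bn * q + rem ↔ c < pvSz q rem r := by
  unfold pvSz
  rcases Nat.lt_or_ge r rem with h|h
  · simp only [if_pos h]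
    constructor
    · intro hlt; by_contra hc
      have h2 : (q + 1) * bn ≤ c * bn := Nat.mul_le_mul_right _ (by omega)
      nlinarith
    · intro hc
      have h2 : c * bn ≤ q * bn := Nat.mul_le_mul_right _ (by omega)
      nlinarith
  · simp only [if_neg (Nat.not_lt.mpr h)]
    constructor
    · intro hlt; by_contra hc
      have h2 : q * bn ≤ c * bn := Nat.mul_le_mul_right _ (by omega)
      nlinarith
    · intro hc
      have h2 : c * bn + bn ≤ q * bn := by
        have := Nat.mul_le_mul_right bn (Nat.succ_le_of_lt hc); simpa [Nat.succ_mul] using this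
      nlinarith

-- what one full inner loop (row r, columns c0, c0+1, …, c0+L-1) does to the state
lemma pv_inner (meet : List Int) (bn q rem : Nat) (hbn : 0 < bn)
    (hn : meet.length = bn * q + rem) (hrem : rem < bn) (r : Nat) (hr : r < bn) :
    ∀ (L c0 : Nat) (F : List (Option Int)) (s : Nat), F.length = meet.length →
    ∀ (G : List (Option Int)) (s' : Int),
      pvInnerA meet (bn : Int) (r : Int)
        ((List.range L).map (fun j => ((c0 + j : Nat) : Int))) (F, (s : Int)) = (G, s') →
      s' = ((s + min L (pvSz q rem r - c0) : Nat) : Int)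
      ∧ G.length = meet.length
      ∧ ∀ d : Nat, d < meet.length →
          G[d]? =
            if d % bn = r ∧ c0 ≤ d / bn ∧ d / bn < c0 + min L (pvSz q rem r - c0)
            then some (meet[(s + (d / bn - c0))]?)
            else F[d]? := by
  intro L
  induction L with
  | zero =>
      intro c0 F s hF G s' h
      simp only [List.range_zero, List.map_nil, pvInnerA] at h
      obtain ⟨rfl, rfl⟩ : F = G ∧ (s : Int) = s' :=
        ⟨congrArg Prod.fst h, congrArg Prod.snd h⟩
      exact ⟨by simp, hF, fun d hd => by rw [if_neg (by omega)]⟩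
  | succ L ih =>
      intro c0 F s hF G s' h
      rw [List.range_succ_eq_map, List.map_cons, List.map_map] at h
      have hfun : ((fun j => ((c0 + j : Nat) : Int)) ∘ Nat.succ)
          = (fun j => (((c0 + 1) + j : Nat) : Int)) := by
        funext j; simp only [Function.comp]; congr 1; omega
      rw [hfun] at h
      have hcast : ((c0 + 0 : Nat) : Int) * (bn : Int) + (r : Int) = ((c0 * bn + r : Nat) : Int) := by
        push_cast; ring
      simp only [pvInnerA, hcast] at h
      have hwidx : (c0 * bn + r) % bn = r := by
        rw [Nat.mul_comm, Nat.mul_add_mod, Nat.mod_eq_of_lt hr]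
      have hwdiv : (c0 * bn + r) / bn = c0 := by
        have h1 := Nat.mul_add_div hbn c0 r
        have h2 := Nat.div_eq_of_lt hr
        rw [Nat.mul_comm]; omega
      by_cases hbrk : c0 < pvSz q rem r
      · -- no break: dest < length, write and recurse
        have hdlt : c0 * bn + r < meet.length := by
          rw [hn]; exact (pv_char bn q rem hrem r c0 hr).mpr hbrk
        rw [if_neg (by push_cast; omega)] at h
        rw [Int.toNat_natCast] at h
        have hs1 : ((s : Int) + 1) = ((s + 1 : Nat) : Int) := by push_cast; ring
        rw [hs1] at h
        obtain ⟨h1, h2, h3⟩ := ih (c0 + 1) (F.set (c0 * bn + r) (PySem.List.pyGet? meet (s : Int)))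
          (s + 1) (by simp [hF]) G s' h
        have hmin : min (L + 1) (pvSz q rem r - c0) = min L (pvSz q rem r - (c0 + 1)) + 1 := by omega
        refine ⟨by rw [h1]; congr 1; omega, h2, ?_⟩
        intro d hd
        rw [h3 d hd]
        by_cases hm : d % bn = r
        · by_cases hdc : d / bn = c0
          · -- d is exactly the slot written this step
            have hde : c0 * bn + r = d := by
              rw [← hdc, ← hm]; exact Nat.div_add_mod' d bn
            have hset : (F.set (c0 * bn + r) (PySem.List.pyGet? meet (s : Int)))[d]? =
                some (PySem.List.pyGet? meet (s : Int)) := by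
              rw [← hde]; exact List.getElem?_set_self (by omega)
            rw [if_neg (by omega), hset, if_pos ⟨hm, by omega, by omega⟩]
            have hidx : s + (d / bn - c0) = s := by omega
            rw [hidx]
            simp [PySem.List.pyGet?_natCast]
          · have hne : c0 * bn + r ≠ d := fun he => hdc (by rw [← he]; exact hwdiv)
            by_cases hge : c0 + 1 ≤ d / bn
            · by_cases hlt2 : d / bn < c0 + 1 + min L (pvSz q rem r - (c0 + 1))
              · rw [if_pos ⟨hm, hge, hlt2⟩, if_pos ⟨hm, by omega, by omega⟩]
                have hidx : s + 1 + (d / bn - (c0 + 1)) = s + (d / bn - c0) := by omega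
                rw [hidx]
              · rw [if_neg (by omega), if_neg (by omega), List.getElem?_set_ne hne]
            · rw [if_neg (by omega), if_neg (by omega), List.getElem?_set_ne hne]
        · have hne : c0 * bn + r ≠ d := fun he => hm (by rw [← he]; exact hwidx)
          rw [if_neg (fun hc => hm hc.1), if_neg (fun hc => hm hc.1), List.getElem?_set_ne hne]
      · -- break: dest ≥ length, state unchanged
        have hge' : (meet.length : Int) ≤ ((c0 * bn + r : Nat) : Int) := by
          have : meet.length ≤ c0 * bn + r := by
            by_contra hlt
            exact hbrk ((pv_char bn q rem hrem r c0 hr).mp (by omega))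
          exact_mod_cast this
        rw [if_pos hge'] at h
        obtain ⟨rfl, rfl⟩ : F = G ∧ (s : Int) = s' :=
          ⟨congrArg Prod.fst h, congrArg Prod.snd h⟩
        have h0 : pvSz q rem r - c0 = 0 := by omega
        exact ⟨by rw [h0]; simp, hF, fun d hd => by rw [if_neg (by omega)]⟩

lemma pv_off_succ (q rem R : Nat) : pvOff q rem (R + 1) = pvOff q rem R + pvSz q rem R := by
  unfold pvOff pvSz
  have h1 : (R + 1) * q = R * q + q := by ring
  rcases Nat.lt_or_ge R rem with h|h
  · simp only [if_pos h]; omega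
  · simp only [if_neg (Nat.not_lt.mpr h)]; omega

lemma pv_off_le (bn q rem R : Nat) (hR : R ≤ bn) : pvOff q rem R ≤ bn * q + rem := by
  unfold pvOff
  have h1 : R * q ≤ bn * q := Nat.mul_le_mul_right _ hR
  omega

-- invariant of A's outer loop: after rows 0..R-1, src is at the start of column R and
-- exactly the residue classes below R are filled with the pivoted values
lemma pv_outer (meet : List Int) (bn q rem : Nat) (hbn : 0 < bn)
    (hn : meet.length = bn * q + rem) (hrem : rem < bn) :
    ∀ (R : Nat), R ≤ bn →
    ∀ (G : List (Option Int)) (s' : Int),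
      ((List.range R).map (fun k => ((k : Nat) : Int))).foldl
        (fun st row => pvInnerA meet (bn : Int) row
          ((List.range (q + 1)).map (fun j => ((j : Nat) : Int))) st)
        (List.replicate meet.length (none : Option Int), (0 : Int)) = (G, s')
      →
      s' = ((pvOff q rem R : Nat) : Int)
      ∧ G.length = meet.length
      ∧ ∀ d : Nat, d < meet.length →
          G[d]? = if d % bn < R then some (some ((meet[pvPerm bn q rem d]?).getD 0))
                  else some none := by
  intro R
  induction R with
  | zero =>
      intro _ G s' h
      simp only [List.range_zero, List.map_nil, List.foldl_nil] at h
      obtain ⟨rfl, rfl⟩ : (List.replicate meet.length (none : Option Int)) = G ∧ (0 : Int) = s' :=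
        ⟨congrArg Prod.fst h, congrArg Prod.snd h⟩
      refine ⟨by simp [pvOff], by simp, ?_⟩
      intro d hd
      rw [if_neg (by omega), List.getElem?_replicate, if_pos hd]
  | succ R ih =>
      intro hR G s' h
      rw [show (List.range (R + 1)).map (fun k => ((k : Nat) : Int))
            = (List.range R).map (fun k => ((k : Nat) : Int)) ++ [((R : Nat) : Int)] from by
          rw [List.range_succ]; simp] at h
      rw [List.foldl_append, List.foldl_cons, List.foldl_nil] at h
      rcases hp : ((List.range R).map (fun k => ((k : Nat) : Int))).foldl
        (fun st row => pvInnerA meet (bn : Int) row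
          ((List.range (q + 1)).map (fun j => ((j : Nat) : Int))) st)
        (List.replicate meet.length (none : Option Int), (0 : Int)) with ⟨G0, s0⟩
      rw [hp] at h
      obtain ⟨h1, h2, h3⟩ := ih (by omega) G0 s0 hp
      rw [h1] at h
      rw [show ((List.range (q + 1)).map (fun j => ((j : Nat) : Int)))
          = ((List.range (q + 1)).map (fun j => ((0 + j : Nat) : Int))) by simp] at h
      obtain ⟨g1, g2, g3⟩ := pv_inner meet bn q rem hbn hn hrem R (by omega)
        (q + 1) 0 G0 (pvOff q rem R) h2 G s' h
      have hszle : pvSz q rem R ≤ q + 1 := by unfold pvSz; split <;> omega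
      simp only [Nat.sub_zero, Nat.zero_add, Nat.zero_le, true_and] at g1 g3
      have hmin : min (q + 1) (pvSz q rem R) = pvSz q rem R := by omega
      simp only [hmin] at g1 g3
      have hoffs := pv_off_succ q rem R
      refine ⟨by rw [g1]; congr 1; omega, g2, ?_⟩
      intro d hd
      rw [g3 d hd]
      have hdm := Nat.div_add_mod' d bn
      by_cases hm : d % bn = R
      · have hdivlt : d / bn < pvSz q rem R := by
          refine (pv_char bn q rem hrem R (d / bn) (by omega)).mp ?_
          omega
        rw [if_pos ⟨hm, hdivlt⟩, if_pos (by omega)]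
        have hpermlt : pvOff q rem R + d / bn < meet.length := by
          have hle := pv_off_le bn q rem (R + 1) hR
          omega
        have hperm : pvPerm bn q rem d = pvOff q rem R + d / bn := by
          unfold pvPerm; rw [hm]
        rw [hperm, List.getElem?_eq_getElem hpermlt]
        simp
      · rw [if_neg (fun hc => hm hc.1), h3 d hd]
        by_cases hlt : d % bn < R
        · rw [if_pos hlt, if_pos (by omega)]
        · rw [if_neg hlt, if_neg (by omega)]

-- the two ports agree on every input
lemma pv_eq (meetings : List Int) (batch_size : Int) :
    batch_meetings meetings batch_size = batch_meetings_alt meetings batch_size := by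
  unfold batch_meetings batch_meetings_alt
  by_cases hb : batch_size ≤ 0
  · rw [if_pos hb, if_pos hb]
  · rw [if_neg hb, if_neg hb]
    have hb0 : 0 < batch_size := by omega
    obtain ⟨bn, rfl⟩ : ∃ bn : Nat, batch_size = (bn : Int) := ⟨batch_size.toNat, by omega⟩
    have hbn : 0 < bn := by exact_mod_cast hb0
    have hn : meetings.length = bn * (meetings.length / bn) + meetings.length % bn :=
      (Nat.div_add_mod _ bn).symm
    have hrem : meetings.length % bn < bn := Nat.mod_lt _ hbn
    have hcl : PySem.Int.floordiv (meetings.length : Int) (bn : Int) + 1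
        = ((meetings.length / bn + 1 : Nat) : Int) := by
      rw [PySem.Int.floordiv_natCast]; push_cast; ring
    have hr1 : ∀ m : Nat, PySem.List.pyRange 0 (m : Int) 1
        = (List.range m).map (fun k => ((k : Nat) : Int)) := by
      intro m
      rw [PySem.List.pyRange_one]
      simp
    simp only [hcl, hr1]
    rcases hst : ((List.range bn).map (fun k => ((k : Nat) : Int))).foldl
        (fun st row => pvInnerA meetings (bn : Int) row
          ((List.range (meetings.length / bn + 1)).map (fun j => ((j : Nat) : Int))) st)
        (List.replicate meetings.length (none : Option Int), (0 : Int)) with ⟨G, s2⟩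
    obtain ⟨-, h2, h3⟩ := pv_outer meetings bn (meetings.length / bn) (meetings.length % bn)
      hbn hn hrem bn le_rfl G s2 hst
    simp only []
    refine List.ext_getElem? ?_
    intro i
    rw [List.getElem?_map, List.map_map, List.getElem?_map]
    by_cases hi : i < meetings.length
    · rw [List.getElem?_range hi, h3 i hi, if_pos (Nat.mod_lt _ hbn)]
      simp only [Option.map_some, Option.getD_some, Function.comp_apply, pvPerm, pvOff]
      rw [PySem.Int.mod_natCast, PySem.Int.mod_natCast, PySem.Int.floordiv_natCast,
        PySem.Int.floordiv_natCast]
      rw [show (((i % bn : Nat) : Int) * ((meetings.length / bn : Nat) : Int)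
            + min ((i % bn : Nat) : Int) ((meetings.length % bn : Nat) : Int)
            + ((i / bn : Nat) : Int))
          = ((i % bn * (meetings.length / bn) + min (i % bn) (meetings.length % bn) + i / bn : Nat) : Int)
        from by push_cast; ring]
      rw [PySem.List.pyGet?_natCast]
    · have hi2 : G.length ≤ i := by omega
      rw [List.getElem?_eq_none (by simpa using hi2), List.getElem?_eq_none (by simpa using hi)]
      rfl

-- ===== VERDICT (by name: the statement is the Claim_ definition above) =====
theorem batch_meetings_spec : Claim_equal_batch_meetings := by
  intro meetings batch_size _dom
  unfold Spec_batch_meetings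
  exact pv_eq meetings batch_size
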